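-- pv_equiv track=rewrite | github.com/asafgolan/Hot | infra/proxy/ssh_raw_transfer_windows.py | add_browser_headers
-- ===== SOURCE A (Python) =====
-- def add_browser_headers(headers, url, is_resource):
--     """Add realistic browser headers optimized for caching and performance"""
--     # Base browser headers
--     base_headers = {
--         'User-Agent': 'Mozilla/5.0 (Windows NT 10.0; Win64; x64) AppleWebKit/537.36 (KHTML, like Gecko) Chrome/120.0.0.0 Safari/537.36',
--         'Accept-Language': 'en-US,en;q=0.9',
--         'Accept-Encoding': 'gzip, deflate, br, zstd',  # Support modern compression
--     }
--
--     # Resource-specific headers for better caching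
--     if is_resource:
--         if url.endswith(('.css', '.js')):
--             # CSS/JS files - allow browser caching
--             base_headers.update({
--                 'Accept': 'text/css,*/*;q=0.1' if url.endswith('.css') else 'application/javascript,*/*;q=0.8',
--                 'Sec-Fetch-Dest': 'style' if url.endswith('.css') else 'script',
--                 'Sec-Fetch-Mode': 'no-cors',
--                 'Sec-Fetch-Site': 'same-origin',
--                 'Cache-Control': 'max-age=3600'  # Allow 1 hour cache
--             })
--         elif url.endswith(('.png', '.jpg', '.jpeg', '.gif', '.svg', '.ico')):
--             # Images - strong caching
--             base_headers.update({
--                 'Accept': 'image/avif,image/webp,image/apng,image/svg+xml,image/*,*/*;q=0.8',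
--                 'Sec-Fetch-Dest': 'image',
--                 'Sec-Fetch-Mode': 'no-cors',
--                 'Sec-Fetch-Site': 'same-origin',
--                 'Cache-Control': 'max-age=86400'  # Allow 24 hour cache
--             })
--         elif url.endswith(('.woff', '.woff2', '.ttf', '.eot')):
--             # Fonts - very strong caching
--             base_headers.update({
--                 'Accept': 'font/woff2,font/woff,*/*;q=0.1',
--                 'Sec-Fetch-Dest': 'font',
--                 'Sec-Fetch-Mode': 'cors',
--                 'Sec-Fetch-Site': 'same-origin',
--                 'Cache-Control': 'max-age=604800'  # Allow 1 week cache
--             })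
--         else:
--             # Other resources
--             base_headers.update({
--                 'Accept': '*/*',
--                 'Sec-Fetch-Dest': 'empty',
--                 'Sec-Fetch-Mode': 'cors',
--                 'Sec-Fetch-Site': 'same-origin'
--             })
--     else:
--         # HTML documents - minimal caching
--         base_headers.update({
--             'Accept': 'text/html,application/xhtml+xml,application/xml;q=0.9,image/avif,image/webp,image/apng,*/*;q=0.8',
--             'Cache-Control': 'no-cache',
--             'Pragma': 'no-cache',
--             'Sec-Fetch-Dest': 'document',
--             'Sec-Fetch-Mode': 'navigate',
--             'Sec-Fetch-Site': 'none',
--             'Sec-Fetch-User': '?1',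
--             'Upgrade-Insecure-Requests': '1'
--         })
--
--     # Add headers if not present
--     for header, value in base_headers.items():
--         if header not in headers:
--             headers[header] = value
--
--     return headers
-- ===== SOURCE B (Python) =====
-- # Classify by the extension extracted once via rpartition('.') + O(1) dict lookup
-- # (instead of 13 endswith tests), then one filter pass extends the dict.
-- _UA = 'Mozilla/5.0 (Windows NT 10.0; Win64; x64) AppleWebKit/537.36 (KHTML, like Gecko) Chrome/120.0.0.0 Safari/537.36'
--
-- _KIND_BY_EXT = {
--     'css': 'css', 'js': 'js',
--     'png': 'image', 'jpg': 'image', 'jpeg': 'image', 'gif': 'image',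
--     'svg': 'image', 'ico': 'image',
--     'woff': 'font', 'woff2': 'font', 'ttf': 'font', 'eot': 'font',
-- }
--
-- def _row(extra):
--     return [('User-Agent', _UA),
--             ('Accept-Language', 'en-US,en;q=0.9'),
--             ('Accept-Encoding', 'gzip, deflate, br, zstd')] + extra
--
-- _ROWS = {
--     'css': _row([('Accept', 'text/css,*/*;q=0.1'),
--                  ('Sec-Fetch-Dest', 'style'),
--                  ('Sec-Fetch-Mode', 'no-cors'),
--                  ('Sec-Fetch-Site', 'same-origin'),
--                  ('Cache-Control', 'max-age=3600')]),
--     'js': _row([('Accept', 'application/javascript,*/*;q=0.8'),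
--                 ('Sec-Fetch-Dest', 'script'),
--                 ('Sec-Fetch-Mode', 'no-cors'),
--                 ('Sec-Fetch-Site', 'same-origin'),
--                 ('Cache-Control', 'max-age=3600')]),
--     'image': _row([('Accept', 'image/avif,image/webp,image/apng,image/svg+xml,image/*,*/*;q=0.8'),
--                    ('Sec-Fetch-Dest', 'image'),
--                    ('Sec-Fetch-Mode', 'no-cors'),
--                    ('Sec-Fetch-Site', 'same-origin'),
--                    ('Cache-Control', 'max-age=86400')]),
--     'font': _row([('Accept', 'font/woff2,font/woff,*/*;q=0.1'),
--                   ('Sec-Fetch-Dest', 'font'),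
--                   ('Sec-Fetch-Mode', 'cors'),
--                   ('Sec-Fetch-Site', 'same-origin'),
--                   ('Cache-Control', 'max-age=604800')]),
--     'other': _row([('Accept', '*/*'),
--                    ('Sec-Fetch-Dest', 'empty'),
--                    ('Sec-Fetch-Mode', 'cors'),
--                    ('Sec-Fetch-Site', 'same-origin')]),
--     'doc': _row([('Accept', 'text/html,application/xhtml+xml,application/xml;q=0.9,image/avif,image/webp,image/apng,*/*;q=0.8'),
--                  ('Cache-Control', 'no-cache'),
--                  ('Pragma', 'no-cache'),
--                  ('Sec-Fetch-Dest', 'document'),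
--                  ('Sec-Fetch-Mode', 'navigate'),
--                  ('Sec-Fetch-Site', 'none'),
--                  ('Sec-Fetch-User', '?1'),
--                  ('Upgrade-Insecure-Requests', '1')]),
-- }
--
-- def add_browser_headers(headers, url, is_resource):
--     """Add realistic browser headers optimized for caching and performance"""
--     if is_resource:
--         _head, sep, ext = url.rpartition('.')
--         kind = _KIND_BY_EXT.get(ext, 'other') if sep else 'other'
--     else:
--         kind = 'doc'
--     missing = [(k, v) for k, v in _ROWS[kind] if k not in headers]
--     headers.update(missing)
--     return headers
-- ===== Notes on version B (the rewrite author's own statement) =====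
-- stated objective: alternative
-- what changed: B extracts the URL's extension once with rpartition('.') and classifies it by a single O(1) dict lookup (correct because url.endswith('.x') with dot-free x holds iff the text after the last dot equals x), instead of A's 13 endswith suffix tests, and replaces A's per-key setdefault loop by building the list of missing pairs in one filter pass and extending the dict with it.
import Mathlib
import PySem

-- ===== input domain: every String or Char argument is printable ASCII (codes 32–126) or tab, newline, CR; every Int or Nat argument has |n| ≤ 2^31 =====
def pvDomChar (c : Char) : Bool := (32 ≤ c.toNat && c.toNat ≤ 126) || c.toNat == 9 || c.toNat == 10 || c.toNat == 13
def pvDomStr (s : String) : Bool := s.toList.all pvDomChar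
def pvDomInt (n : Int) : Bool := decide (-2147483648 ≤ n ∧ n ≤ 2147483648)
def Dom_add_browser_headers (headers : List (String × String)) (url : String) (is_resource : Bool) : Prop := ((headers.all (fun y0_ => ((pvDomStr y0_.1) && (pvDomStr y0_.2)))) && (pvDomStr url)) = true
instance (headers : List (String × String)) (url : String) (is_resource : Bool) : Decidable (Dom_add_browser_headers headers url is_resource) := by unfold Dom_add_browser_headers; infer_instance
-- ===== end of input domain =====

-- B classifies the URL by its extension extracted ONCE (rpartition('.')) with a dict lookup,
-- instead of A's 13 endswith tests, and merges by one filter pass; objective: alternative.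
-- Python note: A mutates the `headers` dict in place and returns it; B performs the same
-- mutation (headers.update of the missing pairs); the equivalence here is about the return value.

-- ===== PORT A =====
-- `headers[k] = v` under `k not in headers` appends a fresh key: ported as list append.
def add_browser_headers (headers : List (String × String)) (url : String) (is_resource : Bool) : List (String × String) :=
  let base : PySem.Dict String String := PySem.Dict.ofList [
    ("User-Agent", "Mozilla/5.0 (Windows NT 10.0; Win64; x64) AppleWebKit/537.36 (KHTML, like Gecko) Chrome/120.0.0.0 Safari/537.36"),
    ("Accept-Language", "en-US,en;q=0.9"),
    ("Accept-Encoding", "gzip, deflate, br, zstd")]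
  let base :=
    if is_resource then
      if PySem.Str.endswith url ".css" || PySem.Str.endswith url ".js" then
        base.update [
          ("Accept", if PySem.Str.endswith url ".css" then "text/css,*/*;q=0.1" else "application/javascript,*/*;q=0.8"),
          ("Sec-Fetch-Dest", if PySem.Str.endswith url ".css" then "style" else "script"),
          ("Sec-Fetch-Mode", "no-cors"),
          ("Sec-Fetch-Site", "same-origin"),
          ("Cache-Control", "max-age=3600")]
      else if PySem.Str.endswith url ".png" || PySem.Str.endswith url ".jpg" || PySem.Str.endswith url ".jpeg" ||
              PySem.Str.endswith url ".gif" || PySem.Str.endswith url ".svg" || PySem.Str.endswith url ".ico" then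
        base.update [
          ("Accept", "image/avif,image/webp,image/apng,image/svg+xml,image/*,*/*;q=0.8"),
          ("Sec-Fetch-Dest", "image"),
          ("Sec-Fetch-Mode", "no-cors"),
          ("Sec-Fetch-Site", "same-origin"),
          ("Cache-Control", "max-age=86400")]
      else if PySem.Str.endswith url ".woff" || PySem.Str.endswith url ".woff2" ||
              PySem.Str.endswith url ".ttf" || PySem.Str.endswith url ".eot" then
        base.update [
          ("Accept", "font/woff2,font/woff,*/*;q=0.1"),
          ("Sec-Fetch-Dest", "font"),
          ("Sec-Fetch-Mode", "cors"),
          ("Sec-Fetch-Site", "same-origin"),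
          ("Cache-Control", "max-age=604800")]
      else
        base.update [
          ("Accept", "*/*"),
          ("Sec-Fetch-Dest", "empty"),
          ("Sec-Fetch-Mode", "cors"),
          ("Sec-Fetch-Site", "same-origin")]
    else
      base.update [
        ("Accept", "text/html,application/xhtml+xml,application/xml;q=0.9,image/avif,image/webp,image/apng,*/*;q=0.8"),
        ("Cache-Control", "no-cache"),
        ("Pragma", "no-cache"),
        ("Sec-Fetch-Dest", "document"),
        ("Sec-Fetch-Mode", "navigate"),
        ("Sec-Fetch-Site", "none"),
        ("Sec-Fetch-User", "?1"),
        ("Upgrade-Insecure-Requests", "1")]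
  base.items.foldl
    (fun hs kv => if hs.any (fun q => q.1 == kv.1) then hs else hs ++ [kv]) headers

-- ===== PORT B =====
-- port of url.rpartition('.'): `some tail-after-last-dot` when a '.' occurs, `none` otherwise
-- (the extension is kept as its character list, String ≅ List Char; comparison semantics identical)
def pvLastDotTail : List Char → Option (List Char)
  | [] => none
  | c :: rest =>
    match pvLastDotTail rest with
    | some t => some t
    | none => if c = '.' then some rest else none

def pvKindByExt : PySem.Dict (List Char) String := PySem.Dict.ofList [
  (['c','s','s'], "css"), (['j','s'], "js"),
  (['p','n','g'], "image"), (['j','p','g'], "image"), (['j','p','e','g'], "image"),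
  (['g','i','f'], "image"), (['s','v','g'], "image"), (['i','c','o'], "image"),
  (['w','o','f','f'], "font"), (['w','o','f','f','2'], "font"),
  (['t','t','f'], "font"), (['e','o','t'], "font")]

def pvRow (extra : List (String × String)) : List (String × String) :=
  [("User-Agent", "Mozilla/5.0 (Windows NT 10.0; Win64; x64) AppleWebKit/537.36 (KHTML, like Gecko) Chrome/120.0.0.0 Safari/537.36"),
   ("Accept-Language", "en-US,en;q=0.9"),
   ("Accept-Encoding", "gzip, deflate, br, zstd")] ++ extra

def pvRows : PySem.Dict String (List (String × String)) := PySem.Dict.ofList [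
  ("css", pvRow [
    ("Accept", "text/css,*/*;q=0.1"),
    ("Sec-Fetch-Dest", "style"),
    ("Sec-Fetch-Mode", "no-cors"),
    ("Sec-Fetch-Site", "same-origin"),
    ("Cache-Control", "max-age=3600")]),
  ("js", pvRow [
    ("Accept", "application/javascript,*/*;q=0.8"),
    ("Sec-Fetch-Dest", "script"),
    ("Sec-Fetch-Mode", "no-cors"),
    ("Sec-Fetch-Site", "same-origin"),
    ("Cache-Control", "max-age=3600")]),
  ("image", pvRow [
    ("Accept", "image/avif,image/webp,image/apng,image/svg+xml,image/*,*/*;q=0.8"),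
    ("Sec-Fetch-Dest", "image"),
    ("Sec-Fetch-Mode", "no-cors"),
    ("Sec-Fetch-Site", "same-origin"),
    ("Cache-Control", "max-age=86400")]),
  ("font", pvRow [
    ("Accept", "font/woff2,font/woff,*/*;q=0.1"),
    ("Sec-Fetch-Dest", "font"),
    ("Sec-Fetch-Mode", "cors"),
    ("Sec-Fetch-Site", "same-origin"),
    ("Cache-Control", "max-age=604800")]),
  ("other", pvRow [
    ("Accept", "*/*"),
    ("Sec-Fetch-Dest", "empty"),
    ("Sec-Fetch-Mode", "cors"),
    ("Sec-Fetch-Site", "same-origin")]),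
  ("doc", pvRow [
    ("Accept", "text/html,application/xhtml+xml,application/xml;q=0.9,image/avif,image/webp,image/apng,*/*;q=0.8"),
    ("Cache-Control", "no-cache"),
    ("Pragma", "no-cache"),
    ("Sec-Fetch-Dest", "document"),
    ("Sec-Fetch-Mode", "navigate"),
    ("Sec-Fetch-Site", "none"),
    ("Sec-Fetch-User", "?1"),
    ("Upgrade-Insecure-Requests", "1")])]

def add_browser_headers_alt (headers : List (String × String)) (url : String) (is_resource : Bool) : List (String × String) :=
  let kind : String :=
    if is_resource then
      match pvLastDotTail url.toList with
      | some ext => (pvKindByExt.get? ext).getD "other"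
      | none => "other"
    else "doc"
  -- _ROWS[kind]: every kind produced above is a key of pvRows, so getD [] never defaults
  let missing := ((pvRows.get? kind).getD []).filter
    (fun kv => !(headers.any (fun q => q.1 == kv.1)))
  headers ++ missing

-- ===== PRECONDITION & SPEC =====
def Spec_add_browser_headers (headers : List (String × String)) (url : String) (is_resource : Bool) (out : List (String × String)) : Prop := out = add_browser_headers_alt headers url is_resource
instance (headers : List (String × String)) (url : String) (is_resource : Bool) (out : List (String × String)) : Decidable (Spec_add_browser_headers headers url is_resource out) := by unfold Spec_add_browser_headers; infer_instance

-- ===== CLAIM =====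
def Claim_equal_add_browser_headers : Prop := ∀ (headers : List (String × String)) (url : String) (is_resource : Bool), Dom_add_browser_headers headers url is_resource → Spec_add_browser_headers headers url is_resource (add_browser_headers headers url is_resource)

-- ===== LEMMAS AND PROOFS =====

theorem pv_ldt_eq_none {xs : List Char} (h : '.' ∉ xs) : pvLastDotTail xs = none := by
  induction xs with
  | nil => rfl
  | cons c rest ih =>
    simp only [List.mem_cons, not_or] at h
    simp [pvLastDotTail, ih h.2, Ne.symm h.1]

theorem pv_ldt_ne_dot {xs : List Char} (h : pvLastDotTail xs = none) : '.' ∉ xs := by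
  induction xs with
  | nil => simp
  | cons c rest ih =>
    simp only [pvLastDotTail] at h
    cases hrest : pvLastDotTail rest with
    | some t => rw [hrest] at h; simp at h
    | none =>
      rw [hrest] at h
      by_cases hc : c = '.'
      · simp [hc] at h
      · simp only [List.mem_cons, not_or]
        exact ⟨fun hx => hc hx.symm, ih hrest⟩

theorem pv_ldt_append (pre t : List Char) (ht : '.' ∉ t) :
    pvLastDotTail (pre ++ '.' :: t) = some t := by
  induction pre with
  | nil => simp [pvLastDotTail, pv_ldt_eq_none ht]
  | cons c pre ih => simp [pvLastDotTail, ih]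

theorem pv_ldt_some {xs t : List Char} (h : pvLastDotTail xs = some t) :
    ∃ pre, xs = pre ++ '.' :: t := by
  induction xs generalizing t with
  | nil => simp [pvLastDotTail] at h
  | cons c rest ih =>
    simp only [pvLastDotTail] at h
    cases hrest : pvLastDotTail rest with
    | some t' =>
      rw [hrest] at h
      injection h with he
      subst he
      obtain ⟨pre, hp⟩ := ih hrest
      exact ⟨c :: pre, by simp [hp]⟩
    | none =>
      rw [hrest] at h
      by_cases hc : c = '.'
      · subst hc
        rw [if_pos rfl] at h
        injection h with he
        exact ⟨[], by simp [he]⟩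
      · simp [hc] at h

theorem pv_ew_eq {url : String} {t s : List Char} (hs : '.' ∉ s)
    (hm : pvLastDotTail url.toList = some t) {p : String} (hp : p.toList = '.' :: s) :
    PySem.Str.endswith url p = (t == s) := by
  rw [PySem.Str.endswith_eq, hp]
  by_cases h : t = s
  · subst h
    obtain ⟨pre, hpre⟩ := pv_ldt_some hm
    simp only [beq_self_eq_true]
    exact (PySem.Chars.endswith_iff _ _).mpr ⟨pre, hpre.symm⟩
  · rw [beq_eq_false_iff_ne.mpr h]
    cases hE : PySem.Chars.endswith url.toList ('.' :: s) with
    | false => rfl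
    | true =>
      obtain ⟨u, hu⟩ := (PySem.Chars.endswith_iff _ _).mp hE
      rw [← hu, pv_ldt_append u s hs] at hm
      injection hm with he
      exact (h he.symm).elim

theorem pv_ew_false {url : String} {s : List Char} (hm : pvLastDotTail url.toList = none)
    {p : String} (hp : p.toList = '.' :: s) : PySem.Str.endswith url p = false := by
  rw [PySem.Str.endswith_eq, hp]
  cases hE : PySem.Chars.endswith url.toList ('.' :: s) with
  | false => rfl
  | true =>
    obtain ⟨u, hu⟩ := (PySem.Chars.endswith_iff _ _).mp hE
    exact absurd (by rw [← hu]; simp : '.' ∈ url.toList) (pv_ldt_ne_dot hm)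

-- the setdefault loop over a table with distinct keys = one filter pass appended
theorem pv_merge (L : List (String × String)) (hnd : (L.map Prod.fst).Nodup)
    (headers : List (String × String)) :
    L.foldl (fun hs kv => if hs.any (fun q => q.1 == kv.1) then hs else hs ++ [kv]) headers
      = headers ++ L.filter (fun kv => !(headers.any (fun q => q.1 == kv.1))) := by
  induction L generalizing headers with
  | nil => simp
  | cons kv rest ih =>
    simp only [List.map_cons, List.nodup_cons] at hnd
    simp only [List.foldl_cons, List.filter_cons]
    by_cases h : headers.any (fun q => q.1 == kv.1)
    · simp only [h, Bool.not_true, reduceIte]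
      exact ih hnd.2 headers
    · have hb : (headers.any fun q => q.1 == kv.1) = false := Bool.eq_false_iff.mpr h
      simp only [hb, Bool.false_eq_true, if_false, Bool.not_false, reduceIte]
      rw [ih hnd.2 (headers ++ [kv])]
      rw [List.filter_congr (q := fun kv' => !(headers.any (fun q => q.1 == kv'.1)))
        (fun x hx => by
          have hne : kv.1 ≠ x.1 := fun e => hnd.1 (e ▸ List.mem_map_of_mem hx)
          simp [List.any_append, beq_eq_false_iff_ne.mpr hne])]
      simp [List.append_assoc]

-- ===== VERDICT =====
theorem add_browser_headers_spec : Claim_equal_add_browser_headers := by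
  intro headers url is_resource _
  unfold Spec_add_browser_headers add_browser_headers add_browser_headers_alt
  cases is_resource with
  | false =>
    simp only [Bool.false_eq_true, if_false]
    exact pv_merge _ (by decide) headers
  | true =>
    cases hm : pvLastDotTail url.toList with
    | none =>
      rw [pv_ew_false (s := ['c','s','s']) hm (p := ".css") (by decide), pv_ew_false (s := ['j','s']) hm (p := ".js") (by decide),
          pv_ew_false (s := ['p','n','g']) hm (p := ".png") (by decide), pv_ew_false (s := ['j','p','g']) hm (p := ".jpg") (by decide),
          pv_ew_false (s := ['j','p','e','g']) hm (p := ".jpeg") (by decide), pv_ew_false (s := ['g','i','f']) hm (p := ".gif") (by decide),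
          pv_ew_false (s := ['s','v','g']) hm (p := ".svg") (by decide), pv_ew_false (s := ['i','c','o']) hm (p := ".ico") (by decide),
          pv_ew_false (s := ['w','o','f','f']) hm (p := ".woff") (by decide), pv_ew_false (s := ['w','o','f','f','2']) hm (p := ".woff2") (by decide),
          pv_ew_false (s := ['t','t','f']) hm (p := ".ttf") (by decide), pv_ew_false (s := ['e','o','t']) hm (p := ".eot") (by decide)]
      exact pv_merge _ (by decide) headers
    | some t =>
      rw [pv_ew_eq (s := ['c','s','s']) (by decide) hm (p := ".css") (by decide),
          pv_ew_eq (s := ['j','s']) (by decide) hm (p := ".js") (by decide),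
          pv_ew_eq (s := ['p','n','g']) (by decide) hm (p := ".png") (by decide),
          pv_ew_eq (s := ['j','p','g']) (by decide) hm (p := ".jpg") (by decide),
          pv_ew_eq (s := ['j','p','e','g']) (by decide) hm (p := ".jpeg") (by decide),
          pv_ew_eq (s := ['g','i','f']) (by decide) hm (p := ".gif") (by decide),
          pv_ew_eq (s := ['s','v','g']) (by decide) hm (p := ".svg") (by decide),
          pv_ew_eq (s := ['i','c','o']) (by decide) hm (p := ".ico") (by decide),
          pv_ew_eq (s := ['w','o','f','f']) (by decide) hm (p := ".woff") (by decide),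
          pv_ew_eq (s := ['w','o','f','f','2']) (by decide) hm (p := ".woff2") (by decide),
          pv_ew_eq (s := ['t','t','f']) (by decide) hm (p := ".ttf") (by decide),
          pv_ew_eq (s := ['e','o','t']) (by decide) hm (p := ".eot") (by decide)]
      by_cases h1 : t = ['c','s','s']
      · subst h1; exact pv_merge _ (by decide) headers
      all_goals rw [beq_eq_false_iff_ne.mpr h1]
      by_cases h2 : t = ['j','s']
      · subst h2; exact pv_merge _ (by decide) headers
      all_goals rw [beq_eq_false_iff_ne.mpr h2]
      by_cases h3 : t = ['p','n','g']
      · subst h3; exact pv_merge _ (by decide) headers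
      all_goals rw [beq_eq_false_iff_ne.mpr h3]
      by_cases h4 : t = ['j','p','g']
      · subst h4; exact pv_merge _ (by decide) headers
      all_goals rw [beq_eq_false_iff_ne.mpr h4]
      by_cases h5 : t = ['j','p','e','g']
      · subst h5; exact pv_merge _ (by decide) headers
      all_goals rw [beq_eq_false_iff_ne.mpr h5]
      by_cases h6 : t = ['g','i','f']
      · subst h6; exact pv_merge _ (by decide) headers
      all_goals rw [beq_eq_false_iff_ne.mpr h6]
      by_cases h7 : t = ['s','v','g']
      · subst h7; exact pv_merge _ (by decide) headers
      all_goals rw [beq_eq_false_iff_ne.mpr h7]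
      by_cases h8 : t = ['i','c','o']
      · subst h8; exact pv_merge _ (by decide) headers
      all_goals rw [beq_eq_false_iff_ne.mpr h8]
      by_cases h9 : t = ['w','o','f','f']
      · subst h9; exact pv_merge _ (by decide) headers
      all_goals rw [beq_eq_false_iff_ne.mpr h9]
      by_cases h10 : t = ['w','o','f','f','2']
      · subst h10; exact pv_merge _ (by decide) headers
      all_goals rw [beq_eq_false_iff_ne.mpr h10]
      by_cases h11 : t = ['t','t','f']
      · subst h11; exact pv_merge _ (by decide) headers
      all_goals rw [beq_eq_false_iff_ne.mpr h11]
      by_cases h12 : t = ['e','o','t']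
      · subst h12; exact pv_merge _ (by decide) headers
      all_goals rw [beq_eq_false_iff_ne.mpr h12]
      -- every extension equality is now false: A takes the default branch; B's dict lookup misses
      have hmiss : (pvKindByExt.get? t).getD "other" = "other" := by
        have hk : pvKindByExt = PySem.Dict.mk [
          (['c','s','s'], "css"), (['j','s'], "js"),
          (['p','n','g'], "image"), (['j','p','g'], "image"), (['j','p','e','g'], "image"),
          (['g','i','f'], "image"), (['s','v','g'], "image"), (['i','c','o'], "image"),
          (['w','o','f','f'], "font"), (['w','o','f','f','2'], "font"),
          (['t','t','f'], "font"), (['e','o','t'], "font")] := rfl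
        simp [hk,
          beq_eq_false_iff_ne.mpr (Ne.symm h1), beq_eq_false_iff_ne.mpr (Ne.symm h2),
          beq_eq_false_iff_ne.mpr (Ne.symm h3), beq_eq_false_iff_ne.mpr (Ne.symm h4),
          beq_eq_false_iff_ne.mpr (Ne.symm h5), beq_eq_false_iff_ne.mpr (Ne.symm h6),
          beq_eq_false_iff_ne.mpr (Ne.symm h7), beq_eq_false_iff_ne.mpr (Ne.symm h8),
          beq_eq_false_iff_ne.mpr (Ne.symm h9), beq_eq_false_iff_ne.mpr (Ne.symm h10),
          beq_eq_false_iff_ne.mpr (Ne.symm h11), beq_eq_false_iff_ne.mpr (Ne.symm h12),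
          PySem.Dict.get?]
      dsimp only
      rw [hmiss]
      exact pv_merge _ (by decide) headers
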